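-- pv_equiv track=rewrite | github.com/yunus-karaman/TeleAI | solution_steps/patterns.py | _select_terms
-- ===== SOURCE A (Python) =====
-- from collections import Counter, defaultdict
--
-- def _select_terms(
--     unigrams: Counter[str],
--     bigrams: Counter[str],
--     stems: list[str],
--     fallback_terms: list[str],
--     top_k: int,
-- ) -> list[str]:
--     ranked: list[tuple[int, str]] = []
--     for term, count in bigrams.items():
--         if count < 2:
--             continue
--         if any(stem in term for stem in stems):
--             ranked.append((count, term))
--     for term, count in unigrams.items():
--         if count < 2:
--             continue
--         if any(stem in term for stem in stems):
--             ranked.append((count, term))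
--
--     ranked.sort(key=lambda item: (-item[0], item[1]))
--     selected: list[str] = []
--     seen = set()
--     for _, term in ranked:
--         if term in seen:
--             continue
--         seen.add(term)
--         selected.append(term)
--         if len(selected) >= top_k:
--             break
--
--     for fallback in fallback_terms:
--         fallback_clean = fallback.lower().strip()
--         if not fallback_clean or fallback_clean in seen:
--             continue
--         selected.append(fallback_clean)
--         seen.add(fallback_clean)
--         if len(selected) >= top_k:
--             break
--
--     return selected[:top_k]
-- ===== SOURCE B (Python) =====
-- def _select_terms(unigrams, bigrams, stems, fallback_terms, top_k):
--     # best count per matching term, aggregated in one pass (no duplicate pairs kept)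
--     best = {}
--     for term, count in list(bigrams.items()) + list(unigrams.items()):
--         if count >= 2 and best.get(term, 0) < count and any(s in term for s in stems):
--             best[term] = count
--
--     # partial selection: repeatedly extract the (count desc, term asc)-minimal item,
--     # no sort and no dedup pass
--     pool = list(best.items())
--     selected = []
--     while pool and len(selected) < top_k:
--         m = pool[0]
--         for kv in pool[1:]:
--             if (-kv[1], kv[0]) < (-m[1], m[0]):
--                 m = kv
--         pool.remove(m)
--         selected.append(m[0])
--
--     # fallbacks: collect all new cleaned fallbacks, then cut once at top_k
--     chosen = set(selected)
--     extras = []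
--     for fb in fallback_terms:
--         c = fb.lower().strip()
--         if c and c not in chosen:
--             chosen.add(c)
--             extras.append(c)
--     return (selected + extras)[:top_k]
-- ===== Notes on version B (the rewrite author's own statement) =====
-- stated objective: alternative
-- what changed: B never sorts and never deduplicates a ranked list: it aggregates the max count per matching term in a dict, then repeatedly extracts the (count desc, term asc)-minimal item from the pool (partial selection, stopping at top_k), and handles fallbacks by collecting all new cleaned fallbacks and cutting once at top_k instead of A's break-at-top_k loop.
-- outside the precondition, e.g. on _select_terms({'ab': 2}, {}, ['a'], ['cd'], -1): A returns ['ab'], B returns []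
import Mathlib
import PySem

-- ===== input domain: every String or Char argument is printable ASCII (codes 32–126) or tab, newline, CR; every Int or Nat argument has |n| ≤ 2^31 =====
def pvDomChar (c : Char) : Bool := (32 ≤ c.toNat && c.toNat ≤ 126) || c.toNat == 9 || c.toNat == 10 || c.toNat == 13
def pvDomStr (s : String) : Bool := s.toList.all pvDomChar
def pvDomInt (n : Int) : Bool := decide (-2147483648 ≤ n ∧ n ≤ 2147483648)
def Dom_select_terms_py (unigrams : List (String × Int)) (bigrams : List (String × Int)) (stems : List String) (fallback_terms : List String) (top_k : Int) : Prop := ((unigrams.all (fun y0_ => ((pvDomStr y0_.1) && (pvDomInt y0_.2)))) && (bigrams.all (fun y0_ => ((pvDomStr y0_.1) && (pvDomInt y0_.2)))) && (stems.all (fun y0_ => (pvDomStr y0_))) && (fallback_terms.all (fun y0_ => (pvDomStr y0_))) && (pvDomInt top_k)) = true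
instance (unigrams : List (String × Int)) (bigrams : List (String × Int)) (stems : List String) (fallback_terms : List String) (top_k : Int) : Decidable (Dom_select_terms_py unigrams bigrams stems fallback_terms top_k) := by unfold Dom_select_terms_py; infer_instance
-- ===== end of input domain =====

-- B replaces A's filter + full sort + seen-set dedup by a max-count dict and repeated
-- min-extraction (partial selection, no sort), and collects all fallbacks then cuts once at top_k.


-- ===== PORT A =====
-- any(stem in term for stem in stems)
def pvHit (stems : List String) (term : String) : Bool :=
  stems.any (fun stem => PySem.Str.isIn stem term)

-- the 'for term, count in <dict>.items(): if count < 2: continue; if any(...): ranked.append((count, term))' loop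
def pvRankFoldA (stems : List String) (items : List (String × Int)) (init : List (Int × String)) : List (Int × String) :=
  items.foldl (fun acc p =>
    if p.2 < 2 then acc
    else if pvHit stems p.1 then acc ++ [(p.2, p.1)] else acc) init

-- 'for _, term in ranked: …' selection loop with seen-set dedup and break at top_k
def pvSelectLoopA (top_k : Int) : List (Int × String) → List String → PySem.Set String → List String × PySem.Set String
  | [], sel, seen => (sel, seen)
  | p :: rest, sel, seen =>
    if p.2 ∈ seen then pvSelectLoopA top_k rest sel seen
    else
      let seen' := PySem.Set.add seen p.2
      let sel' := sel ++ [p.2]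
      if top_k ≤ (sel'.length : Int) then (sel', seen')
      else pvSelectLoopA top_k rest sel' seen'

-- A's 'for fallback in fallback_terms: …' loop with break at top_k
def pvFallbackLoop (top_k : Int) : List String → List String → PySem.Set String → List String
  | [], sel, _ => sel
  | fb :: rest, sel, seen =>
    let fc := PySem.Str.strip (PySem.Str.lower fb)
    if fc = "" ∨ fc ∈ seen then pvFallbackLoop top_k rest sel seen
    else
      let sel' := sel ++ [fc]
      let seen' := PySem.Set.add seen fc
      if top_k ≤ (sel'.length : Int) then sel'
      else pvFallbackLoop top_k rest sel' seen'

def select_terms_py (unigrams : List (String × Int)) (bigrams : List (String × Int)) (stems : List String) (fallback_terms : List String) (top_k : Int) : List String :=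
  let ranked := pvRankFoldA stems (PySem.Dict.ofList bigrams).items []
  let ranked := pvRankFoldA stems (PySem.Dict.ofList unigrams).items ranked
  let rankedSorted := PySem.List.sorted2 ranked (fun it => -it.1) (fun it => it.2)
  let sst := pvSelectLoopA top_k rankedSorted [] PySem.Set.empty
  let selected := pvFallbackLoop top_k fallback_terms sst.1 sst.2
  PySem.List.slice selected none (some top_k)

-- ===== PORT B =====
-- B's own any(s in term for s in stems)
def pvHitB (stems : List String) (term : String) : Bool :=
  stems.any (fun s => PySem.Str.isIn s term)

-- 'if count >= 2 and best.get(term, 0) < count and any(s in term for s in stems): best[term] = count'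
def pvBestFold (stems : List String) (items : List (String × Int)) (d : PySem.Dict String Int) : PySem.Dict String Int :=
  items.foldl (fun d p =>
    if 2 ≤ p.2 ∧ d.getD p.1 0 < p.2 ∧ pvHitB stems p.1 then d.insert p.1 p.2 else d) d

-- pool.remove(m) shrinks the pool (termination of the while loop below)
theorem pvRemoveLen (xs ys : List (String × Int)) (v : String × Int)
    (h : PySem.List.remove? xs v = some ys) : ys.length < xs.length := by
  have hv : v ∈ xs := by
    by_contra hnv
    rw [(PySem.List.remove?_eq_none_iff xs v).mpr hnv] at h
    simp at h
  rw [PySem.List.remove?_eq_some_erase xs v hv] at h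
  have := List.length_erase_of_mem hv
  have hpos : 0 < xs.length := List.length_pos_of_mem hv
  cases h
  omega

-- Python's tuple '<' on (-count, term) pairs, ported by hand (lexicographic; exact for Int × ASCII String)
def pvLexLt (a b : String × Int) : Bool :=
  decide (-a.2 < -b.2) || (!decide (-b.2 < -a.2) && decide (a.1 < b.1))

-- 'm = pool[0]; for kv in pool[1:]: if (-kv[1], kv[0]) < (-m[1], m[0]): m = kv'
def pvMinScan (p : String × Int) (ps : List (String × Int)) : String × Int :=
  ps.foldl (fun m kv => if pvLexLt kv m then kv else m) p

-- 'while pool and len(selected) < top_k: <min scan>; pool.remove(m); selected.append(m[0])'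
def pvSelLoop (top_k : Int) (pool : List (String × Int)) (sel : List String) : List String :=
  match pool with
  | [] => sel
  | p :: ps =>
    if (sel.length : Int) < top_k then
      match h : PySem.List.remove? (p :: ps) (pvMinScan p ps) with
      | none => sel
      | some pool' => pvSelLoop top_k pool' (sel ++ [(pvMinScan p ps).1])
    else sel
termination_by pool.length
decreasing_by exact pvRemoveLen _ _ _ h

-- 'for fb in fallback_terms: c = fb.lower().strip(); if c and c not in chosen: chosen.add(c); extras.append(c)'
def pvExtrasLoop : List String → PySem.Set String → List String → List String
  | [], _, extras => extras
  | fb :: rest, chosen, extras =>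
    let c := PySem.Str.strip (PySem.Str.lower fb)
    if c ≠ "" ∧ c ∉ chosen then pvExtrasLoop rest (PySem.Set.add chosen c) (extras ++ [c])
    else pvExtrasLoop rest chosen extras

def select_terms_py_alt (unigrams : List (String × Int)) (bigrams : List (String × Int)) (stems : List String) (fallback_terms : List String) (top_k : Int) : List String :=
  let best := pvBestFold stems ((PySem.Dict.ofList bigrams).items ++ (PySem.Dict.ofList unigrams).items) PySem.Dict.empty
  let selected := pvSelLoop top_k best.items []
  let extras := pvExtrasLoop fallback_terms (PySem.Set.ofList selected) []
  PySem.List.slice (selected ++ extras) none (some top_k)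

-- ===== PRECONDITION & SPEC =====
-- Pre_ restricts to the task's natural domain of nonnegative top_k ('up to top_k terms'); on negative
-- top_k A's final 'selected[:top_k]' is Python negative-slice truncation, an accident of A's code.
def Pre_select_terms_py (unigrams : List (String × Int)) (bigrams : List (String × Int)) (stems : List String) (fallback_terms : List String) (top_k : Int) : Prop := 0 ≤ top_k
instance (unigrams : List (String × Int)) (bigrams : List (String × Int)) (stems : List String) (fallback_terms : List String) (top_k : Int) : Decidable (Pre_select_terms_py unigrams bigrams stems fallback_terms top_k) := by unfold Pre_select_terms_py; infer_instance

def pvWitness_select_terms_py : (List (String × Int)) × (List (String × Int)) × List String × List String × Int :=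
  ([("ab", 2)], [], ["a"], ["cd"], 2)

def Spec_select_terms_py (unigrams : List (String × Int)) (bigrams : List (String × Int)) (stems : List String) (fallback_terms : List String) (top_k : Int) (out : List String) : Prop := out = select_terms_py_alt unigrams bigrams stems fallback_terms top_k
instance (unigrams : List (String × Int)) (bigrams : List (String × Int)) (stems : List String) (fallback_terms : List String) (top_k : Int) (out : List String) : Decidable (Spec_select_terms_py unigrams bigrams stems fallback_terms top_k out) := by unfold Spec_select_terms_py; infer_instance

-- ===== CLAIM (what is proved, stated in full; the proofs are below) =====
def Claim_equal_select_terms_py : Prop := ∀ (unigrams : List (String × Int)) (bigrams : List (String × Int)) (stems : List String) (fallback_terms : List String) (top_k : Int), Dom_select_terms_py unigrams bigrams stems fallback_terms top_k → Pre_select_terms_py unigrams bigrams stems fallback_terms top_k → Spec_select_terms_py unigrams bigrams stems fallback_terms top_k (select_terms_py unigrams bigrams stems fallback_terms top_k)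

-- ===== LEMMAS AND PROOFS =====

-- the common filter condition and the (count, term) swap
def pvKeep (stems : List String) (p : String × Int) : Bool :=
  decide (2 ≤ p.2) && pvHit stems p.1

def pvSw (p : String × Int) : Int × String := (p.2, p.1)

-- the unguarded max-update step of B's aggregation
def pvG (d : PySem.Dict String Int) (p : String × Int) : PySem.Dict String Int :=
  if d.getD p.1 0 < p.2 then d.insert p.1 p.2 else d

-- max count of a term in the filtered item list
def pvVMax (M : List (String × Int)) (t : String) : Int :=
  ((M.filter (fun p => p.1 = t)).map (·.2)).foldl max 0

-- the sort keys, packaged as lexicographic pairs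
def pvKeyR (p : Int × String) : Int ×ₗ String := toLex (-p.1, p.2)
def pvKeyI (kv : String × Int) : Int ×ₗ String := toLex (-kv.2, kv.1)
def pvKeyT (v : String → Int) (t : String) : Int ×ₗ String := toLex (-(v t), t)

-- first-occurrence dedup of the terms of a (count, term) list, relative to a seen set
def pvDedupFrom : List (Int × String) → PySem.Set String → List String
  | [], _ => []
  | p :: rest, seen =>
    if p.2 ∈ seen then pvDedupFrom rest seen
    else p.2 :: pvDedupFrom rest (PySem.Set.add seen p.2)

-- A's phase-1 take loop over the deduplicated term order
def pvTakeLoopC (top_k : Int) : List String → List String → PySem.Set String → List String × PySem.Set String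
  | [], sel, seen => (sel, seen)
  | t :: ts, sel, seen =>
    let sel' := sel ++ [t]
    let seen' := PySem.Set.add seen t
    if top_k ≤ (sel'.length : Int) then (sel', seen')
    else pvTakeLoopC top_k ts sel' seen'

-- ----- structural bridging lemmas -----

theorem pvRankFoldA_eq (stems : List String) (items : List (String × Int)) (init : List (Int × String)) :
    pvRankFoldA stems items init = init ++ (items.filter (pvKeep stems)).map pvSw := by
  induction items generalizing init with
  | nil => simp [pvRankFoldA]
  | cons p rest ih =>
    simp only [pvRankFoldA, List.foldl_cons, List.filter_cons] at *
    by_cases h2 : p.2 < 2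
    · have hk : pvKeep stems p = false := by
        simp only [pvKeep, Bool.and_eq_false_iff, decide_eq_false_iff_not]
        left; omega
      rw [if_pos h2, hk, ih]; simp
    · rw [if_neg h2]
      by_cases hh : pvHit stems p.1
      · have hk : pvKeep stems p = true := by
          simp only [pvKeep, Bool.and_eq_true, decide_eq_true_eq]
          exact ⟨by omega, hh⟩
        rw [if_pos hh, hk, ih]
        simp [pvSw]
      · have hk : pvKeep stems p = false := by
          simp only [pvKeep, Bool.and_eq_false_iff]
          right; simpa using hh
        rw [if_neg hh, hk, ih]; simp

theorem pvBestFold_eq (stems : List String) (items : List (String × Int)) (d : PySem.Dict String Int) :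
    pvBestFold stems items d = (items.filter (pvKeep stems)).foldl pvG d := by
  rw [List.foldl_filter]
  unfold pvBestFold
  have hhit : pvHitB = pvHit := rfl
  rw [hhit]
  congr 1
  funext d p
  by_cases hk : pvKeep stems p = true
  · rw [if_pos hk]
    have h2 : 2 ≤ p.2 := by
      have := hk; simp only [pvKeep, Bool.and_eq_true, decide_eq_true_eq] at this; exact this.1
    have hh : pvHit stems p.1 = true := by
      have := hk; simp only [pvKeep, Bool.and_eq_true, decide_eq_true_eq] at this; exact this.2
    unfold pvG
    by_cases hc : d.getD p.1 0 < p.2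
    · rw [if_pos ⟨h2, hc, hh⟩, if_pos hc]
    · rw [if_neg (by intro h; exact hc h.2.1), if_neg hc]
  · rw [if_neg hk]
    simp only [pvKeep, Bool.and_eq_true, decide_eq_true_eq] at hk
    rw [if_neg (by intro h; exact hk ⟨h.1, h.2.2⟩)]

theorem pvSorted2_eq_sorted_R (xs : List (Int × String)) :
    PySem.List.sorted2 xs (fun it => -it.1) (fun it => it.2) = PySem.List.sorted xs pvKeyR := by
  simp only [PySem.List.sorted2, PySem.List.sorted, if_neg (by decide : ¬(false = true))]
  congr 1
  funext acc x
  congr 1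
  funext a b
  rw [Bool.eq_iff_iff]
  simp only [Bool.or_eq_true, Bool.and_eq_true, Bool.not_eq_true', decide_eq_true_eq,
    decide_eq_false_iff_not, pvKeyR, Prod.Lex.lt_iff, ofLex_toLex]
  constructor
  · rintro (h | ⟨h, h'⟩)
    · exact Or.inl h
    · rcases lt_or_eq_of_le (not_lt.mp h) with h'' | h''
      · exact Or.inl h''
      · exact Or.inr ⟨by omega, h'⟩
  · rintro (h | ⟨h, h'⟩)
    · exact Or.inl h
    · exact Or.inr ⟨by rw [h]; exact lt_irrefl _, h'⟩

-- ----- dict aggregation lemmas -----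

theorem pvG_fold_getD (M : List (String × Int)) (d : PySem.Dict String Int) (t : String) :
    (M.foldl pvG d).getD t 0 = ((M.filter (fun p => p.1 = t)).map (·.2)).foldl max (d.getD t 0) := by
  induction M generalizing d with
  | nil => simp
  | cons p rest ih =>
    simp only [List.foldl_cons, List.filter_cons]
    by_cases hp : p.1 = t
    · rw [if_pos (by simpa using hp)]
      simp only [List.map_cons, List.foldl_cons]
      rw [ih]
      congr 1
      unfold pvG
      by_cases hc : d.getD p.1 0 < p.2
      · rw [if_pos hc, PySem.Dict.getD_insert]
        rw [if_pos hp.symm, ← hp]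
        omega
      · rw [if_neg hc, ← hp]
        omega
    · rw [if_neg (by simpa using hp)]
      rw [ih]
      congr 1
      unfold pvG
      by_cases hc : d.getD p.1 0 < p.2
      · rw [if_pos hc, PySem.Dict.getD_insert, if_neg (fun h => hp h.symm)]
      · rw [if_neg hc]

theorem pvG_fold_contains (M : List (String × Int)) (d : PySem.Dict String Int) (t : String)
    (hM : ∀ p ∈ M, 0 < p.2) :
    (M.foldl pvG d).contains t = true ↔ d.contains t = true ∨ t ∈ M.map (·.1) := by
  induction M generalizing d with
  | nil => simp
  | cons p rest ih =>
    simp only [List.foldl_cons, List.map_cons, List.mem_cons]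
    have hrest : ∀ q ∈ rest, 0 < q.2 := fun q hq => hM q (List.mem_cons_of_mem _ hq)
    rw [ih _ hrest]
    by_cases hp : p.1 = t
    · constructor
      · intro _; exact Or.inr (Or.inl hp.symm)
      · intro _
        left
        unfold pvG
        by_cases hc : d.getD p.1 0 < p.2
        · rw [if_pos hc, PySem.Dict.contains_insert, hp]
          simp
        · rw [if_neg hc]
          by_contra hnc
          have h0 : d.getD p.1 0 = 0 :=
            PySem.Dict.getD_of_not_contains d 0 (by rw [hp]; exact Bool.not_eq_true _ ▸ (by simpa using hnc))
          have := hM p (List.mem_cons_self ..)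
          omega
    · have hstep : (pvG d p).contains t = d.contains t := by
        unfold pvG
        by_cases hc : d.getD p.1 0 < p.2
        · rw [if_pos hc, PySem.Dict.contains_insert]
          have : (t == p.1) = false := by simpa using fun h => hp h.symm
          rw [this, Bool.false_or]
        · rw [if_neg hc]
      rw [hstep]
      constructor
      · rintro (h | h)
        · exact Or.inl h
        · exact Or.inr (Or.inr h)
      · rintro (h | h | h)
        · exact Or.inl h
        · exact absurd h.symm hp
        · exact Or.inr h

theorem pvG_fold_nodup (M : List (String × Int)) (d : PySem.Dict String Int)
    (h : d.keys.Nodup) : (M.foldl pvG d).keys.Nodup := by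
  induction M generalizing d with
  | nil => exact h
  | cons p rest ih =>
    simp only [List.foldl_cons]
    apply ih
    unfold pvG
    by_cases hc : d.getD p.1 0 < p.2
    · rw [if_pos hc]; exact PySem.Dict.nodup_keys_insert d p.1 p.2 h
    · rw [if_neg hc]; exact h

-- ----- max lemmas -----

theorem pvVMax_ge (M : List (String × Int)) (p : String × Int) (hp : p ∈ M) : p.2 ≤ pvVMax M p.1 := by
  have hmem : p.2 ∈ (M.filter (fun q => q.1 = p.1)).map (·.2) :=
    List.mem_map.mpr ⟨p, List.mem_filter.mpr ⟨hp, by simp⟩, rfl⟩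
  exact (PySem.List.le_foldl_max _ 0).2 _ hmem

theorem pvFoldlMax_mem (l : List Int) (a : Int) : l.foldl max a = a ∨ l.foldl max a ∈ l := by
  induction l generalizing a with
  | nil => exact Or.inl rfl
  | cons b l ih =>
    simp only [List.foldl_cons, List.mem_cons]
    rcases ih (max a b) with h | h
    · rcases max_choice a b with hm | hm
      · exact Or.inl (h.trans hm)
      · exact Or.inr (Or.inl (h.trans hm))
    · exact Or.inr (Or.inr h)

theorem pvVMax_attained (M : List (String × Int)) (t : String) (hM : ∀ p ∈ M, 0 < p.2)
    (ht : t ∈ M.map (·.1)) : (t, pvVMax M t) ∈ M := by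
  obtain ⟨p, hpM, hpt⟩ := List.mem_map.mp ht
  have hple : p.2 ≤ pvVMax M t := hpt ▸ pvVMax_ge M p hpM
  rcases pvFoldlMax_mem ((M.filter (fun q => q.1 = t)).map (·.2)) 0 with h | h
  · exfalso
    have := hM p hpM
    rw [pvVMax, h] at hple
    omega
  · obtain ⟨q, hqF, hq2⟩ := List.mem_map.mp h
    have hq := List.mem_filter.mp hqF
    have hq1 : q.1 = t := by simpa using hq.2
    have : q = (t, pvVMax M t) := Prod.ext hq1 hq2
    exact this ▸ hq.1

-- ----- dedup lemmas -----

theorem pvDedupFrom_mem (S : List (Int × String)) (seen : PySem.Set String) (t : String) :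
    t ∈ pvDedupFrom S seen ↔ t ∉ seen ∧ ∃ c, (c, t) ∈ S := by
  induction S generalizing seen with
  | nil => simp [pvDedupFrom]
  | cons p rest ih =>
    simp only [pvDedupFrom]
    by_cases hs : p.2 ∈ seen
    · rw [if_pos hs, ih]
      constructor
      · rintro ⟨hns, c, hc⟩
        exact ⟨hns, c, List.mem_cons_of_mem _ hc⟩
      · rintro ⟨hns, c, hc⟩
        rcases List.mem_cons.mp hc with h | h
        · exfalso; apply hns; have : t = p.2 := by rw [← h]
          rw [this]; exact hs
        · exact ⟨hns, c, h⟩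
    · rw [if_neg hs]
      simp only [List.mem_cons, ih, PySem.Set.mem_add]
      constructor
      · rintro (h | ⟨hns, c, hc⟩)
        · exact ⟨h ▸ hs, p.1, Or.inl (by rw [h])⟩
        · exact ⟨fun hmem => hns (Or.inl hmem), c, Or.inr hc⟩
      · rintro ⟨hns, c, hc⟩
        rcases hc with h | h
        · left; exact (congrArg Prod.snd h)
        · by_cases hpt : t = p.2
          · exact Or.inl hpt
          · exact Or.inr ⟨fun hmem => (by rcases hmem with h' | h'; exact hns h'; exact hpt h'), c, h⟩

theorem pvDedupFrom_nodup (S : List (Int × String)) (seen : PySem.Set String) :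
    (pvDedupFrom S seen).Nodup := by
  induction S generalizing seen with
  | nil => simp [pvDedupFrom]
  | cons p rest ih =>
    simp only [pvDedupFrom]
    by_cases hs : p.2 ∈ seen
    · rw [if_pos hs]; exact ih seen
    · rw [if_neg hs]
      refine List.nodup_cons.mpr ⟨?_, ih _⟩
      intro hmem
      have := (pvDedupFrom_mem _ _ _).mp hmem
      exact this.1 ((PySem.Set.mem_add seen p.2 p.2).mpr (Or.inr rfl))

theorem pvKeyR_le_of_le {c c' : Int} {t : String} (h : c ≤ c') (x : Int ×ₗ String)
    (hx : pvKeyR (c, t) ≤ x) : pvKeyR (c', t) ≤ x := by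
  apply le_trans _ hx
  rw [pvKeyR, pvKeyR, Prod.Lex.le_iff]
  rcases lt_or_eq_of_le h with h' | h'
  · left; simpa using h'
  · right; simp [h']

theorem pvDedupFrom_pairwise (v : String → Int) (S : List (Int × String)) (seen : PySem.Set String)
    (hpw : S.Pairwise (fun a b => pvKeyR a ≤ pvKeyR b))
    (h1 : ∀ p ∈ S, p.1 ≤ v p.2)
    (h2 : ∀ p ∈ S, p.2 ∉ seen → (v p.2, p.2) ∈ S) :
    (pvDedupFrom S seen).Pairwise (fun a b => pvKeyT v a ≤ pvKeyT v b) := by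
  induction S generalizing seen with
  | nil => simp [pvDedupFrom]
  | cons p rest ih =>
    have hpwr := (List.pairwise_cons.mp hpw).2
    have hhd := (List.pairwise_cons.mp hpw).1
    simp only [pvDedupFrom]
    by_cases hs : p.2 ∈ seen
    · rw [if_pos hs]
      apply ih seen hpwr (fun q hq => h1 q (List.mem_cons_of_mem _ hq))
      intro q hq hqs
      have hq2 : q.2 ≠ p.2 := fun h => hqs (h ▸ hs)
      rcases List.mem_cons.mp (h2 q (List.mem_cons_of_mem _ hq) hqs) with h | h
      · exact absurd (congrArg Prod.snd h) hq2
      · exact h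
    · rw [if_neg hs]
      refine List.pairwise_cons.mpr ⟨?_, ?_⟩
      · intro t' ht'
        have hm := (pvDedupFrom_mem _ _ _).mp ht'
        obtain ⟨c', hc'⟩ := hm.2
        have ht'ns : t' ∉ seen ∧ t' ≠ p.2 := by
          have := hm.1
          rw [PySem.Set.mem_add] at this
          push Not at this
          exact this
        have hvt' : (v t', t') ∈ p :: rest := by
          apply h2 (c', t') (List.mem_cons_of_mem _ hc') ht'ns.1
        have hvt'r : (v t', t') ∈ rest := by
          rcases List.mem_cons.mp hvt' with h | h
          · exact absurd (congrArg Prod.snd h) ht'ns.2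
          · exact h
        have hle : pvKeyR p ≤ pvKeyR (v t', t') := hhd _ hvt'r
        have : pvKeyR (p.1, p.2) ≤ pvKeyR (v t', t') := by
          simpa using hle
        have := pvKeyR_le_of_le (h1 p (List.mem_cons_self ..)) _ this
        simpa [pvKeyR, pvKeyT] using this
      · apply ih _ hpwr (fun q hq => h1 q (List.mem_cons_of_mem _ hq))
        intro q hq hqs
        rw [PySem.Set.mem_add] at hqs
        push Not at hqs
        rcases List.mem_cons.mp (h2 q (List.mem_cons_of_mem _ hq) hqs.1) with h | h
        · exact absurd (congrArg Prod.snd h) hqs.2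
        · exact h

-- ----- loop lemmas -----

theorem pvSelectLoopA_eq (k : Int) (S : List (Int × String)) (sel : List String) (seen : PySem.Set String) :
    pvSelectLoopA k S sel seen = pvTakeLoopC k (pvDedupFrom S seen) sel seen := by
  induction S generalizing sel seen with
  | nil => simp [pvSelectLoopA, pvDedupFrom, pvTakeLoopC]
  | cons p rest ih =>
    simp only [pvSelectLoopA, pvDedupFrom]
    by_cases hs : p.2 ∈ seen
    · rw [if_pos hs, if_pos hs, ih]
    · rw [if_neg hs, if_neg hs]
      simp only [pvTakeLoopC]
      by_cases hk : k ≤ ((sel ++ [p.2]).length : Int)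
      · rw [if_pos hk, if_pos hk]
      · rw [if_neg hk, if_neg hk, ih]

theorem pvSetOfList_append (sel : List String) (t : String) :
    PySem.Set.ofList (sel ++ [t]) = PySem.Set.add (PySem.Set.ofList sel) t := by
  simp [PySem.Set.ofList, List.foldl_append]

theorem pvTakeLoopC_seen (k : Int) (T : List String) (sel : List String)
    (hT : T.Nodup) (hd : ∀ t ∈ T, t ∉ sel) :
    (pvTakeLoopC k T sel (PySem.Set.ofList sel)).2
      = PySem.Set.ofList (pvTakeLoopC k T sel (PySem.Set.ofList sel)).1 := by
  induction T generalizing sel with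
  | nil => simp [pvTakeLoopC]
  | cons t rest ih =>
    simp only [pvTakeLoopC]
    rw [← pvSetOfList_append sel t]
    by_cases hk : k ≤ ((sel ++ [t]).length : Int)
    · rw [if_pos hk]
    · rw [if_neg hk]
      apply ih (sel ++ [t]) (List.nodup_cons.mp hT).2
      intro x hx
      simp only [List.mem_append, List.mem_singleton]
      push Not
      exact ⟨hd x (List.mem_cons_of_mem _ hx), fun h => (List.nodup_cons.mp hT).1 (h ▸ hx)⟩

-- ----- the central equality of the two phase-1 term orders -----

theorem pvCentral (stems : List String) (big uni : List (String × Int)) :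
    pvDedupFrom
        (PySem.List.sorted
          ((((PySem.Dict.ofList big).items ++ (PySem.Dict.ofList uni).items).filter (pvKeep stems)).map pvSw)
          pvKeyR)
        PySem.Set.empty
      = (PySem.List.sorted
          ((((PySem.Dict.ofList big).items ++ (PySem.Dict.ofList uni).items).filter (pvKeep stems)).foldl pvG
            PySem.Dict.empty).items
          pvKeyI).map (·.1) := by
  set M := ((PySem.Dict.ofList big).items ++ (PySem.Dict.ofList uni).items).filter (pvKeep stems) with hM
  set S := PySem.List.sorted (M.map pvSw) pvKeyR with hS
  set best := M.foldl pvG PySem.Dict.empty with hbest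
  have hMpos : ∀ p ∈ M, 0 < p.2 := by
    intro p hp
    have := (List.mem_filter.mp hp).2
    simp only [pvKeep, Bool.and_eq_true, decide_eq_true_eq] at this
    omega
  have hnodup : best.keys.Nodup := pvG_fold_nodup M _ PySem.Dict.nodup_keys_empty
  have hgetD : ∀ t, best.getD t 0 = pvVMax M t := by
    intro t
    rw [hbest, pvG_fold_getD, PySem.Dict.getD_empty]
    rfl
  have hkeysmem : ∀ t, t ∈ best.keys ↔ t ∈ M.map (·.1) := by
    intro t
    rw [← PySem.Dict.contains_iff_mem_keys, pvG_fold_contains M _ t hMpos, PySem.Dict.contains_empty]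
    simp
  have hitems : best.items = best.keys.map (fun k => (k, pvVMax M k)) := by
    rw [PySem.Dict.items_eq_map_keys best hnodup 0]
    exact List.map_congr_left (fun k _ => by rw [hgetD])
  have hkeys_eq : best.keys = best.items.map (·.1) := rfl
  have hmemS : ∀ (c : Int) (t : String), (c, t) ∈ S ↔ (t, c) ∈ M := by
    intro c t
    rw [hS, PySem.List.mem_sorted]
    constructor
    · intro h
      obtain ⟨q, hq, hq2⟩ := List.mem_map.mp h
      have h1 : q.1 = t := congrArg Prod.snd hq2
      have h2 : q.2 = c := congrArg Prod.fst hq2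
      rw [← h1, ← h2]
      exact hq
    · intro h
      exact List.mem_map.mpr ⟨(t, c), h, rfl⟩
  have hsnodup : ((PySem.List.sorted best.items pvKeyI).map (·.1)).Nodup := by
    have hp : ((PySem.List.sorted best.items pvKeyI).map (·.1)).Perm (best.items.map (·.1)) :=
      (PySem.List.sorted_perm best.items pvKeyI false).map _
    exact hp.nodup_iff.mpr (hkeys_eq ▸ hnodup)
  apply PySem.List.eq_of_perm_of_pairwise_le_of_injective (pvKeyT (pvVMax M))
  · intro a b h
    have := congrArg (fun x => (ofLex x).2) h
    simpa [pvKeyT] using this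
  · rw [List.perm_ext_iff_of_nodup (pvDedupFrom_nodup _ _) hsnodup]
    intro t
    rw [pvDedupFrom_mem]
    constructor
    · rintro ⟨-, c, hc⟩
      have := (hmemS c t).mp hc
      refine List.mem_map.mpr ⟨(t, pvVMax M t), ?_, rfl⟩
      rw [PySem.List.mem_sorted, hitems]
      exact List.mem_map.mpr ⟨t, (hkeysmem t).mpr (List.mem_map.mpr ⟨(t, c), this, rfl⟩), rfl⟩
    · intro h
      obtain ⟨kv, hkv, hkv1⟩ := List.mem_map.mp h
      rw [PySem.List.mem_sorted] at hkv
      have hk : kv.1 ∈ best.keys := by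
        rw [hkeys_eq]
        exact List.mem_map.mpr ⟨kv, hkv, rfl⟩
      have := (hkeysmem kv.1).mp hk
      obtain ⟨q, hq, hq1⟩ := List.mem_map.mp this
      refine ⟨List.not_mem_nil, q.2, ?_⟩
      rw [hkv1] at hq1
      exact (hmemS q.2 t).mpr (by rw [← hq1]; exact hq)
  · apply pvDedupFrom_pairwise
    · exact PySem.List.sorted_pairwise (M.map pvSw) pvKeyR
    · intro p hp
      rw [hS, PySem.List.mem_sorted] at hp
      obtain ⟨q, hq, hq2⟩ := List.mem_map.mp hp
      rw [← hq2]
      exact pvVMax_ge M q hq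
    · intro p hp _
      have h2 : (p.2, p.1) ∈ M := by
        have : (p.1, p.2) ∈ S := by rw [← Prod.mk.eta (p := p)] at hp; exact hp
        exact (hmemS p.1 p.2).mp this
      have hmem : p.2 ∈ M.map (·.1) := List.mem_map.mpr ⟨(p.2, p.1), h2, rfl⟩
      exact (hmemS _ _).mpr (pvVMax_attained M p.2 hMpos hmem)
  · apply List.pairwise_map.mpr
    apply List.Pairwise.imp_of_mem (l := PySem.List.sorted best.items pvKeyI)
      (R := fun a b => pvKeyI a ≤ pvKeyI b)
    · intro a b ha hb hle
      have hval : ∀ kv ∈ PySem.List.sorted best.items pvKeyI, kv.2 = pvVMax M kv.1 := by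
        intro kv hkv
        rw [PySem.List.mem_sorted, hitems] at hkv
        obtain ⟨k, -, hk2⟩ := List.mem_map.mp hkv
        rw [← hk2]
      have hkey : ∀ kv ∈ PySem.List.sorted best.items pvKeyI, pvKeyI kv = pvKeyT (pvVMax M) kv.1 := by
        intro kv hkv
        rw [pvKeyI, pvKeyT, hval kv hkv]
      rw [← hkey a ha, ← hkey b hb]
      exact hle
    · exact PySem.List.sorted_pairwise best.items pvKeyI

-- ----- B's selection loop = take of the sorted order -----

theorem pvKeyI_inj : Function.Injective pvKeyI := by
  intro a b h
  have h1 := congrArg (fun x => (ofLex x).1) h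
  have h2 := congrArg (fun x => (ofLex x).2) h
  simp only [pvKeyI, ofLex_toLex] at h1 h2
  exact Prod.ext h2 (by omega)

-- the hand-rolled scan picks an element of minimal pvKeyI
theorem pvLexLt_iff (a b : String × Int) : pvLexLt a b = true ↔ pvKeyI a < pvKeyI b := by
  simp only [pvLexLt, Bool.or_eq_true, Bool.and_eq_true, Bool.not_eq_true', decide_eq_true_eq,
    decide_eq_false_iff_not, pvKeyI, Prod.Lex.lt_iff, ofLex_toLex]
  constructor
  · rintro (h | ⟨h, h'⟩)
    · exact Or.inl h
    · rcases lt_or_eq_of_le (not_lt.mp h) with h'' | h''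
      · exact Or.inl h''
      · exact Or.inr ⟨by omega, h'⟩
  · rintro (h | ⟨h, h'⟩)
    · exact Or.inl h
    · exact Or.inr ⟨by rw [h]; exact lt_irrefl _, h'⟩

theorem pvMinScan_spec : ∀ (ps : List (String × Int)) (p : String × Int),
    pvMinScan p ps ∈ p :: ps ∧ ∀ y ∈ p :: ps, pvKeyI (pvMinScan p ps) ≤ pvKeyI y := by
  intro ps
  induction ps with
  | nil =>
    intro p
    refine ⟨List.mem_cons_self .., ?_⟩
    intro y hy
    rcases List.mem_cons.mp hy with h | h
    · exact h ▸ le_refl _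
    · exact absurd h (by simp)
  | cons x xs ih =>
    intro p
    have hstep : pvMinScan p (x :: xs) = pvMinScan (if pvLexLt x p then x else p) xs := rfl
    by_cases hc : pvLexLt x p = true
    · rw [hstep, if_pos hc]
      obtain ⟨hmem, hmin⟩ := ih x
      refine ⟨?_, ?_⟩
      · rcases List.mem_cons.mp hmem with h | h
        · rw [h]; exact List.mem_cons_of_mem _ (List.mem_cons_self ..)
        · exact List.mem_cons_of_mem _ (List.mem_cons_of_mem _ h)
      · intro y hy
        rcases List.mem_cons.mp hy with h | h
        · exact h ▸ le_trans (hmin x (List.mem_cons_self ..)) (le_of_lt ((pvLexLt_iff x p).mp hc))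
        · exact hmin y h
    · rw [hstep, if_neg (by simpa using hc)]
      obtain ⟨hmem, hmin⟩ := ih p
      refine ⟨?_, ?_⟩
      · rcases List.mem_cons.mp hmem with h | h
        · rw [h]; exact List.mem_cons_self ..
        · exact List.mem_cons_of_mem _ (List.mem_cons_of_mem _ h)
      · intro y hy
        rcases List.mem_cons.mp hy with h | h
        · exact h ▸ hmin p (List.mem_cons_self ..)
        · rcases List.mem_cons.mp h with h' | h'
          · have hnlt : ¬ pvKeyI x < pvKeyI p := fun hl => hc ((pvLexLt_iff x p).mpr hl)
            exact h' ▸ le_trans (hmin p (List.mem_cons_self ..)) (not_lt.mp hnlt)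
          · exact hmin y (List.mem_cons_of_mem _ h')

theorem pvSelLoop_eq (k : Int) : ∀ (n : Nat) (P : List (String × Int)), P.length ≤ n → P.Nodup →
    ∀ (sel : List String),
      pvSelLoop k P sel = sel ++ ((PySem.List.sorted P pvKeyI).map (·.1)).take ((k - sel.length).toNat) := by
  intro n
  induction n with
  | zero =>
    intro P hlen _ sel
    have : P = [] := List.eq_nil_of_length_eq_zero (Nat.le_zero.mp hlen)
    subst this
    rw [pvSelLoop]
    simp [PySem.List.sorted]
  | succ n ih =>
    intro P hlen hnd sel
    cases P with
    | nil =>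
      rw [pvSelLoop]
      simp [PySem.List.sorted]
    | cons p ps =>
      rw [pvSelLoop]
      by_cases hlt : (sel.length : Int) < k
      · rw [if_pos hlt]
        obtain ⟨hmem, hmin⟩ := pvMinScan_spec ps p
        set m := pvMinScan p ps with hmdef
        have hrem := PySem.List.remove?_eq_some_erase (p :: ps) m hmem
        split
        · next heq => rw [heq] at hrem; exact absurd hrem (by simp)
        · next pool' heq =>
          rw [heq] at hrem
          have hpool : pool' = (p :: ps).erase m := Option.some.inj hrem
          subst hpool
          -- identify m with the head of the sorted list
          obtain ⟨m', t, hsort⟩ := List.exists_cons_of_ne_nil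
            (by rw [Ne, PySem.List.sorted_eq_nil_iff]; simp :
              PySem.List.sorted (p :: ps) pvKeyI ≠ [])
          have hm'mem : m' ∈ p :: ps := by
            rw [← PySem.List.mem_sorted (p :: ps) pvKeyI false m', hsort]
            exact List.mem_cons_self ..
          have hhd : ∀ y ∈ p :: ps, pvKeyI m' ≤ pvKeyI y :=
            PySem.List.key_head_sorted_le (p :: ps) pvKeyI hsort
          have hmm' : m = m' := by
            apply pvKeyI_inj
            exact le_antisymm (hmin m' hm'mem) (hhd m hmem)
          subst hmm'
          -- the sorted erase is the tail
          have hperm : (PySem.List.sorted (p :: ps) pvKeyI).Perm (p :: ps) :=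
            PySem.List.sorted_perm (p :: ps) pvKeyI false
          have hpermE : t.Perm ((p :: ps).erase m) := by
            have h1 : ((p :: ps).erase m).Perm ((PySem.List.sorted (p :: ps) pvKeyI).erase m) :=
              (hperm.symm.erase m)
            rw [hsort, List.erase_cons_head] at h1
            exact h1.symm
          have hsnd : (PySem.List.sorted (p :: ps) pvKeyI).Nodup := hperm.nodup_iff.mpr hnd
          have htpw : t.Pairwise (fun a b => pvKeyI a < pvKeyI b) := by
            have hple : (PySem.List.sorted (p :: ps) pvKeyI).Pairwise
                (fun a b => pvKeyI a ≤ pvKeyI b) :=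
              PySem.List.sorted_pairwise (p :: ps) pvKeyI
            have hcomb : (PySem.List.sorted (p :: ps) pvKeyI).Pairwise
                (fun a b => pvKeyI a ≤ pvKeyI b ∧ a ≠ b) := hple.and hsnd
            have : (PySem.List.sorted (p :: ps) pvKeyI).Pairwise
                (fun a b => pvKeyI a < pvKeyI b) :=
              hcomb.imp (fun h => lt_of_le_of_ne h.1 (fun he => h.2 (pvKeyI_inj he)))
            rw [hsort] at this
            exact (List.pairwise_cons.mp this).2
          have hsortE : PySem.List.sorted ((p :: ps).erase m) pvKeyI = t :=
            PySem.List.sorted_eq_of_perm_of_pairwise_lt _ _ pvKeyI hpermE htpw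
          have hlenE : ((p :: ps).erase m).length ≤ n := by
            have := List.length_erase_of_mem hmem
            simp only [List.length_cons] at hlen this ⊢
            omega
          rw [ih ((p :: ps).erase m) hlenE (hnd.erase m) (sel ++ [m.1]), hsortE, hsort]
          simp only [List.map_cons, List.length_append, List.length_cons, List.length_nil]
          have harith : (k - (sel.length : Int)).toNat
              = (k - ((sel.length : Nat) + 0 + 1 : Nat)).toNat + 1 := by
            omega
          rw [harith, List.take_succ_cons]
          simp
      · rw [if_neg hlt]
        have : (k - (sel.length : Int)).toNat = 0 := by omega
        rw [this, List.take_zero, List.append_nil]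

-- A's phase-1 loop output when the cap is not yet reached
theorem pvTakeLoopC_fst (k : Int) : ∀ (T sel : List String) (seen : PySem.Set String),
    (sel.length : Int) < k →
    (pvTakeLoopC k T sel seen).1 = sel ++ T.take ((k - sel.length).toNat) := by
  intro T
  induction T with
  | nil => intro sel seen _; simp [pvTakeLoopC]
  | cons t ts ih =>
    intro sel seen hlt
    simp only [pvTakeLoopC]
    by_cases hk : k ≤ ((sel ++ [t]).length : Int)
    · rw [if_pos hk]
      have h1 : (k - (sel.length : Int)).toNat = 1 := by
        simp only [List.length_append, List.length_cons, List.length_nil] at hk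
        omega
      rw [h1, List.take_succ_cons, List.take_zero]
    · rw [if_neg hk]
      have hlt' : (((sel ++ [t]).length : Nat) : Int) < k := by
        simp only [List.length_append, List.length_cons, List.length_nil] at hk ⊢
        omega
      rw [ih (sel ++ [t]) _ hlt']
      simp only [List.length_append, List.length_cons, List.length_nil]
      have harith : (k - (sel.length : Int)).toNat = (k - ((sel.length : Nat) + (0 + 1) : Nat)).toNat + 1 := by
        simp only [List.length_append, List.length_cons, List.length_nil] at hk
        omega
      rw [harith, List.take_succ_cons]
      simp

-- B's extras loop with an accumulator
theorem pvExtrasLoop_acc : ∀ (fbs : List String) (chosen : PySem.Set String) (e : List String),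
    pvExtrasLoop fbs chosen e = e ++ pvExtrasLoop fbs chosen [] := by
  intro fbs
  induction fbs with
  | nil => intro chosen e; simp [pvExtrasLoop]
  | cons fb rest ih =>
    intro chosen e
    simp only [pvExtrasLoop]
    by_cases hc : PySem.Str.strip (PySem.Str.lower fb) ≠ "" ∧
        PySem.Str.strip (PySem.Str.lower fb) ∉ chosen
    · rw [if_pos hc, if_pos hc, ih _ (e ++ _), ih _ ([] ++ _)]
      simp
    · rw [if_neg hc, if_neg hc, ih]

-- A's break-at-top_k fallback loop agrees with B's collect-then-cut under the final cut
theorem pvFallback_take (k : Int) : ∀ (fbs sel : List String) (s : PySem.Set String),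
    (sel.length : Int) ≤ k →
    (pvFallbackLoop k fbs sel s).take k.toNat = (sel ++ pvExtrasLoop fbs s []).take k.toNat := by
  intro fbs
  induction fbs with
  | nil => intro sel s _; simp [pvFallbackLoop, pvExtrasLoop]
  | cons fb rest ih =>
    intro sel s hle
    simp only [pvFallbackLoop, pvExtrasLoop]
    set fc := PySem.Str.strip (PySem.Str.lower fb) with hfc
    by_cases hskip : fc = "" ∨ fc ∈ s
    · rw [if_pos hskip,
        if_neg (by rintro ⟨h1, h2⟩; rcases hskip with h | h; exact h1 h; exact h2 h),
        ih sel s hle]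
    · have hskip' : fc ≠ "" ∧ fc ∉ s := by push Not at hskip; exact hskip
      rw [if_neg hskip, if_pos hskip',
        pvExtrasLoop_acc rest (PySem.Set.add s fc) ([] ++ [fc])]
      by_cases hk : k ≤ ((sel ++ [fc]).length : Int)
      · rw [if_pos hk]
        have hlen : k.toNat ≤ (sel ++ [fc]).length := by
          simp only [List.length_append, List.length_cons, List.length_nil] at hk ⊢
          omega
        rw [List.nil_append, ← List.append_assoc, List.take_append_of_le_length hlen]
      · rw [if_neg hk]
        have hle' : (((sel ++ [fc]).length : Nat) : Int) ≤ k := by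
          simp only [List.length_append, List.length_cons, List.length_nil] at hk ⊢
          omega
        rw [ih _ _ hle', List.nil_append, ← List.append_assoc]

-- ===== VERDICT (by name: the statement is the Claim_ definition above) =====
theorem select_terms_py_spec : Claim_equal_select_terms_py := by
  unfold Claim_equal_select_terms_py
  intro unigrams bigrams stems fallback_terms top_k _ hpre
  have hk0 : (0 : Int) ≤ top_k := hpre
  simp only [Spec_select_terms_py, select_terms_py, select_terms_py_alt]
  rw [pvRankFoldA_eq, pvRankFoldA_eq, List.nil_append, ← List.map_append, ← List.filter_append,
    pvSorted2_eq_sorted_R, pvBestFold_eq, pvSelectLoopA_eq, pvCentral]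
  set best := (((PySem.Dict.ofList bigrams).items ++ (PySem.Dict.ofList unigrams).items).filter
      (pvKeep stems)).foldl pvG PySem.Dict.empty with hbest
  set T := (PySem.List.sorted best.items pvKeyI).map (·.1) with hT
  have hkeysnd : best.keys.Nodup := pvG_fold_nodup _ _ PySem.Dict.nodup_keys_empty
  have hitemsnd : best.items.Nodup := by
    have : (best.items.map (·.1)).Nodup := hkeysnd
    exact this.of_map
  have hTnodup : T.Nodup := by
    have hp : T.Perm (best.items.map (·.1)) :=
      (PySem.List.sorted_perm best.items pvKeyI false).map _
    exact hp.nodup_iff.mpr hkeysnd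
  rw [PySem.List.slice_to _ hk0, PySem.List.slice_to _ hk0]
  by_cases hpos : 0 < top_k
  · have hselA : (pvTakeLoopC top_k T [] PySem.Set.empty).1 = T.take top_k.toNat := by
      rw [pvTakeLoopC_fst top_k T [] PySem.Set.empty (by simpa using hpos)]
      simp
    have hselB : pvSelLoop top_k best.items [] = T.take top_k.toNat := by
      rw [pvSelLoop_eq top_k best.items.length best.items le_rfl hitemsnd []]
      simp [hT]
    have hseen : (pvTakeLoopC top_k T [] PySem.Set.empty).2
        = PySem.Set.ofList (pvTakeLoopC top_k T [] PySem.Set.empty).1 := by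
      have h0 : (PySem.Set.ofList ([] : List String)) = (PySem.Set.empty : PySem.Set String) := rfl
      rw [← h0]
      exact pvTakeLoopC_seen top_k T [] hTnodup (by simp)
    rw [hseen, hselA, hselB]
    apply pvFallback_take
    have : (T.take top_k.toNat).length ≤ top_k.toNat := by
      simp
    omega
  · have hz : top_k.toNat = 0 := by omega
    rw [hz]
    simp
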